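-- pv_equiv track=rewrite | github.com/choisimo/Capstone | deprecated/services/python/BACKEND-WEB-COLLECTOR/parsers/json_parser.py | _is_safe_for_eval
-- ===== SOURCE A (Python) =====
-- def _is_safe_for_eval(text: str) -> bool:
--     """
--     eval 사용 안전성 체크
--
--     Args:
--         text: 검사할 텍스트
--
--     Returns:
--         안전 여부
--     """
--     # 위험한 키워드 체크
--     dangerous = [
--         '__', 'import', 'exec', 'eval', 'open',
--         'file', 'input', 'compile', 'globals', 'locals'
--     ]
--
--     text_lower = text.lower()
--     for keyword in dangerous:
--         if keyword in text_lower: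
--             return False
--
--     # 길이 제한
--     if len(text) > 50000:  # 50KB 제한
--         return False
--
--     return True
-- ===== SOURCE B (Python) =====
-- def _is_safe_for_eval(text: str) -> bool:
--     """Single left-to-right pass: at each position check whether any
--     dangerous keyword begins there, instead of ten separate substring scans."""
--     keywords = ('__', 'import', 'exec', 'eval', 'open',
--                 'file', 'input', 'compile', 'globals', 'locals')
--     t = text.lower()
--     for i in range(len(t)):
--         if any(t.startswith(k, i) for k in keywords):
--             return False
--     return len(text) <= 50000
-- ===== Notes on version B (the rewrite author's own statement) =====
-- stated objective: alternative
-- what changed: Replaces ten independent full substring scans (one per dangerous keyword) by a single left-to-right pass over the lowered text that tests at each position whether any keyword starts there, and ends with a direct length comparison instead of a negated guard chain.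
import Mathlib
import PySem

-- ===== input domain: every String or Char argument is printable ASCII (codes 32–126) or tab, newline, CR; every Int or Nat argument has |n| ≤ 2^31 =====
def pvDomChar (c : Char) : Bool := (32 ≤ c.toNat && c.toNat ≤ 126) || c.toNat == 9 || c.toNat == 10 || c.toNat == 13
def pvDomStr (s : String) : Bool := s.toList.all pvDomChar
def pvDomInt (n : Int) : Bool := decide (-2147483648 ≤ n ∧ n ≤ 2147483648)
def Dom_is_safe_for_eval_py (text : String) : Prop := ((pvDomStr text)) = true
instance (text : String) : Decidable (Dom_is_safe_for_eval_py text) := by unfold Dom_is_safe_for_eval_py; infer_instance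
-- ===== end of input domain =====

-- B replaces A's ten successive 'keyword in text' scans by one position-by-position pass
-- testing all keywords as prefixes at each position (objective: alternative structure).

-- ===== PORT A =====
-- A's dangerous-keyword list (as lists of chars; both ports share the same literal list)
def pvDangerous : List (List Char) :=
  ["__".toList, "import".toList, "exec".toList, "eval".toList, "open".toList,
   "file".toList, "input".toList, "compile".toList, "globals".toList, "locals".toList]

-- A's 'for keyword in dangerous: if keyword in text_lower: return False'
def pvALoop (tl : List Char) : List (List Char) → Bool
  | [] => true
  | k :: ks => if PySem.Chars.isIn k tl then false else pvALoop tl ks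

def is_safe_for_eval_py (text : String) : Bool :=
  let text_lower := PySem.Chars.lower text.toList
  if pvALoop text_lower pvDangerous then
    if text.toList.length > 50000 then false else true
  else false

-- ===== PORT B =====
-- B's 'for i in range(len(t)): if any(t.startswith(k, i) ...)': recursion over suffixes of t
def pvBScan : List Char → Bool
  | [] => false
  | c :: rest =>
      if pvDangerous.any (fun k => PySem.Chars.startswith (c :: rest) k) then true
      else pvBScan rest

def is_safe_for_eval_py_alt (text : String) : Bool :=
  let t := PySem.Chars.lower text.toList
  if pvBScan t then false else decide (text.toList.length ≤ 50000)

-- ===== PRECONDITION & SPEC =====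
def Spec_is_safe_for_eval_py (text : String) (out : Bool) : Prop := out = is_safe_for_eval_py_alt text
instance (text : String) (out : Bool) : Decidable (Spec_is_safe_for_eval_py text out) := by unfold Spec_is_safe_for_eval_py; infer_instance

-- ===== CLAIM (what is proved, stated in full; the proofs are below) =====
def Claim_equal_is_safe_for_eval_py : Prop := ∀ (text : String), Dom_is_safe_for_eval_py text → Spec_is_safe_for_eval_py text (is_safe_for_eval_py text)

-- ===== LEMMAS AND PROOFS =====

-- A's loop returns true iff no keyword occurs as a substring
theorem pvALoop_eq_true_iff (tl : List Char) (ks : List (List Char)) :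
    pvALoop tl ks = true ↔ ∀ k ∈ ks, PySem.Chars.isIn k tl = false := by
  induction ks with
  | nil => simp [pvALoop]
  | cons k ks ih =>
      simp only [pvALoop]
      by_cases h : PySem.Chars.isIn k tl = true
      · simp [h]
      · simp only [Bool.not_eq_true] at h
        simp [h, ih]

-- B's scan returns true iff some keyword is a prefix of some suffix
theorem pvBScan_eq_true_iff (t : List Char) :
    pvBScan t = true ↔ ∃ k ∈ pvDangerous, ∃ j, k <+: t.drop j := by
  induction t with
  | nil =>
      simp only [pvBScan, List.drop_nil]
      constructor
      · intro h; exact absurd h (by simp)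
      · rintro ⟨k, hk, j, hp⟩
        have hne : k ≠ [] := by
          revert hk; unfold pvDangerous; intro hk; fin_cases hk <;> simp
        exact absurd (List.prefix_nil.mp hp) hne
  | cons c rest ih =>
      simp only [pvBScan]
      by_cases h : pvDangerous.any (fun k => PySem.Chars.startswith (c :: rest) k) = true
      · simp only [h, if_true, true_iff]
        obtain ⟨k, hk, hs⟩ := List.any_eq_true.mp h
        exact ⟨k, hk, 0, by simpa using (PySem.Chars.startswith_iff _ _).mp hs⟩
      · rw [if_neg h, ih]
        constructor
        · rintro ⟨k, hk, j, hp⟩; exact ⟨k, hk, j + 1, by simpa using hp⟩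
        · rintro ⟨k, hk, j, hp⟩
          cases j with
          | zero =>
              exfalso
              exact h (List.any_eq_true.mpr ⟨k, hk,
                (PySem.Chars.startswith_iff _ _).mpr (by simpa using hp)⟩)
          | succ j => exact ⟨k, hk, j, by simpa using hp⟩

-- the two occurrence tests agree
theorem pvBScan_eq_any (t : List Char) :
    pvBScan t = pvDangerous.any (fun k => PySem.Chars.isIn k t) := by
  by_cases h : pvBScan t = true
  · rw [h]
    obtain ⟨k, hk, j, hp⟩ := (pvBScan_eq_true_iff t).mp h
    exact (List.any_eq_true.mpr ⟨k, hk,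
      (PySem.Chars.exists_prefix_drop_iff_isIn k t).mp ⟨j, hp⟩⟩).symm
  · have h' : pvBScan t = false := by simpa using h
    rw [h']
    symm
    simp only [List.any_eq_false]
    intro k hk hin
    obtain ⟨j, hp⟩ := (PySem.Chars.exists_prefix_drop_iff_isIn k t).mpr hin
    exact h ((pvBScan_eq_true_iff t).mpr ⟨k, hk, j, hp⟩)

-- ===== VERDICT (by name: the statement is the Claim_ definition above) =====
theorem is_safe_for_eval_py_spec : Claim_equal_is_safe_for_eval_py := by
  intro text _
  unfold Spec_is_safe_for_eval_py is_safe_for_eval_py is_safe_for_eval_py_alt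
  simp only [pvBScan_eq_any]
  by_cases hA : pvALoop (PySem.Chars.lower text.toList) pvDangerous = true
  · have hno := (pvALoop_eq_true_iff _ _).mp hA
    have hany : pvDangerous.any (fun k => PySem.Chars.isIn k (PySem.Chars.lower text.toList)) = false :=
      List.any_eq_false.mpr (fun k hk => by simp [hno k hk])
    simp only [hA, hany, if_true, Bool.false_eq_true, if_false]
    split_ifs with hl
    · exact (decide_eq_false (by omega)).symm
    · exact (decide_eq_true (by omega)).symm
  · have hA' : pvALoop (PySem.Chars.lower text.toList) pvDangerous = false := by simpa using hA
    have hany : pvDangerous.any (fun k => PySem.Chars.isIn k (PySem.Chars.lower text.toList)) = true := by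
      by_contra hc
      have hc' := List.any_eq_false.mp (by simpa using hc)
      exact hA ((pvALoop_eq_true_iff _ _).mpr (fun k hk => by simpa using hc' k hk))
    simp [hA', hany]
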